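-- pv_equiv track=rewrite | github.com/weihe13/Lee_code | Amazon/amazon.py | validString
-- ===== SOURCE A (Python) =====
-- def validString(string):
--     stack = []
--     for i in range(len(string)):
--         if not stack or stack[-1] != string[i]:
--             stack.append(string[i])
--         else:
--             stack.pop()
--
--     return len(stack) == 0
-- ===== SOURCE B (Python) =====
-- def _first_pair(seq):
--     for i in range(len(seq) - 1):
--         if seq[i] == seq[i + 1]:
--             return i
--     return None
--
--
-- def validString(string):
--     seq = list(string)
--     while True:
--         i = _first_pair(seq)
--         if i is None:
--             return len(seq) == 0
--         del seq[i:i + 2]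
-- ===== Notes on version B (the rewrite author's own statement) =====
-- stated objective: alternative
-- what changed: Replaces the one-pass stack with a rewriting procedure that repeatedly finds the first adjacent equal pair, splices it out and restarts, returning whether the sequence becomes empty (the xx->empty rewriting is confluent, so it reaches the same answer).
import Mathlib
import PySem

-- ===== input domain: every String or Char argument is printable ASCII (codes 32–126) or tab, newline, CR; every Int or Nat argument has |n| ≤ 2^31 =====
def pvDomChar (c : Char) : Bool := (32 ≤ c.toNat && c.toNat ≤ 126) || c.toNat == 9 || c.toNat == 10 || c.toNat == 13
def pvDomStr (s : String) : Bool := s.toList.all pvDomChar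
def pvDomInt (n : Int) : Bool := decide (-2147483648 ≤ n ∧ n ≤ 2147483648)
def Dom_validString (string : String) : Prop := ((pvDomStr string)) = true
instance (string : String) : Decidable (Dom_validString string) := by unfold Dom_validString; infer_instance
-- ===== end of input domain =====

-- B replaces A's stack with repeated first-adjacent-pair removal until none remains; same result, alternative algorithm.

-- ===== PORT A =====
-- one loop step of A: push string[i] unless it equals the stack top, else pop
def pvStepA (stack : List Char) (c : Char) : List Char :=
  if stack.isEmpty || stack.getLast? != some c then stack ++ [c] else stack.dropLast

def validString (string : String) : Bool :=
  ((string.toList.foldl pvStepA []).length == 0)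

-- ===== PORT B =====
-- _first_pair: scan for the first index i with seq[i] == seq[i+1]
def pvFirstPair : List Char → Nat → Option Nat
  | a :: b :: rest, i => if a = b then some i else pvFirstPair (b :: rest) (i + 1)
  | _, _ => none

-- bound needed by reduceLoop's termination
theorem pvFirstPair_bound : ∀ (l : List Char) (i j : Nat),
    pvFirstPair l i = some j → i ≤ j ∧ j - i + 2 ≤ l.length := by
  intro l
  induction l with
  | nil => intro i j h; simp [pvFirstPair] at h
  | cons a t ih =>
    cases t with
    | nil => intro i j h; simp [pvFirstPair] at h
    | cons b r =>
      intro i j h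
      simp only [pvFirstPair] at h
      split at h
      · cases h; simp only [List.length_cons]; omega
      · have := ih i.succ j h
        simp only [List.length_cons] at this ⊢
        omega

-- the while loop: splice out the first adjacent equal pair (del seq[i:i+2], i.e. take i ++ drop (i+2)) and restart
def pvReduceLoop (seq : List Char) : Bool :=
  match h : pvFirstPair seq 0 with
  | none => seq.length == 0
  | some i => pvReduceLoop (seq.take i ++ seq.drop (i + 2))
termination_by seq.length
decreasing_by
  have hb := pvFirstPair_bound seq 0 i h
  simp [List.length_take, List.length_drop]
  omega

def validString_alt (string : String) : Bool := pvReduceLoop string.toList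

-- ===== PRECONDITION & SPEC =====
def Spec_validString (string : String) (out : Bool) : Prop := out = validString_alt string
instance (string : String) (out : Bool) : Decidable (Spec_validString string out) := by unfold Spec_validString; infer_instance

-- ===== CLAIM (what is proved, stated in full; the proofs are below) =====
def Claim_equal_validString : Prop := ∀ (string : String), Dom_validString string → Spec_validString string (validString string)

-- ===== LEMMAS AND PROOFS =====

-- "no adjacent equal elements"
def NA (l : List Char) : Prop := List.IsChain (· ≠ ·) l

theorem pvStepA_push {st : List Char} {c : Char} (h : st.getLast? ≠ some c) :
    pvStepA st c = st ++ [c] := by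
  unfold pvStepA
  split
  · rfl
  · rename_i hc
    simp at hc
    exact absurd hc.2 h

theorem pvStepA_pop {st : List Char} {c : Char} (h : st.getLast? = some c) :
    pvStepA st c = st.dropLast := by
  unfold pvStepA
  split
  · rename_i hc
    cases st with
    | nil => simp at h
    | cons a t => simp [h] at hc
  · rfl

theorem na_append_last {st : List Char} {c : Char} (h : NA (st ++ [c])) :
    st.getLast? ≠ some c := by
  rcases (List.isChain_append.mp h) with ⟨_, _, h3⟩
  intro hl
  exact (h3 c hl c rfl) rfl

theorem na_stepA {st : List Char} (h : NA st) (c : Char) : NA (pvStepA st c) := by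
  by_cases hl : st.getLast? = some c
  · rw [pvStepA_pop hl]
    have : st.dropLast <+: st := List.dropLast_prefix st
    exact List.IsChain.prefix h this
  · rw [pvStepA_push hl]
    refine List.isChain_append.mpr ⟨h, List.isChain_singleton c, ?_⟩
    intro x hx y hy
    simp at hy
    subst hy
    intro hxy
    subst hxy
    exact hl hx

theorem pvStepA_stepA {st : List Char} (h : NA st) (c : Char) :
    pvStepA (pvStepA st c) c = st := by
  by_cases hl : st.getLast? = some c
  · rw [pvStepA_pop hl]
    have hne : st ≠ [] := by intro he; simp [he] at hl
    have hst : st.dropLast ++ [c] = st := by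
      have := List.dropLast_append_getLast hne
      rwa [List.getLast_eq_iff_getLast?_eq_some hne |>.mpr hl] at this
    have hdl : st.dropLast.getLast? ≠ some c := by
      have : NA (st.dropLast ++ [c]) := by rwa [hst]
      exact na_append_last this
    rw [pvStepA_push hdl, hst]
  · rw [pvStepA_push hl]
    have : (st ++ [c]).getLast? = some c := by simp
    rw [pvStepA_pop this, List.dropLast_concat]

theorem na_foldl {st : List Char} (h : NA st) (l : List Char) :
    NA (l.foldl pvStepA st) := by
  induction l generalizing st with
  | nil => exact h
  | cons c t ih => exact ih (na_stepA h c)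

-- cancelling an adjacent equal pair does not change A's stack
theorem foldl_cancel {st : List Char} (h : NA st) (u v : List Char) (c : Char) :
    (u ++ c :: c :: v).foldl pvStepA st = (u ++ v).foldl pvStepA st := by
  rw [List.foldl_append, List.foldl_append]
  simp only [List.foldl_cons]
  rw [pvStepA_stepA (na_foldl h u) c]

-- if the whole st ++ l is adjacent-distinct, A's loop just appends l
theorem foldl_nopair : ∀ (l st : List Char), NA (st ++ l) → l.foldl pvStepA st = st ++ l := by
  intro l
  induction l with
  | nil => intro st _; simp
  | cons c t ih =>
    intro st h
    have hpre : NA (st ++ [c]) := by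
      refine List.IsChain.prefix h ?_
      exact ⟨t, by simp⟩
    have hpush : pvStepA st c = st ++ [c] := pvStepA_push (na_append_last hpre)
    simp only [List.foldl_cons, hpush]
    have := ih (st ++ [c]) (by simpa using h)
    simpa using this

theorem pvFirstPair_none : ∀ (l : List Char) (i : Nat), pvFirstPair l i = none → NA l := by
  intro l
  induction l with
  | nil => intro _ _; simp [NA]
  | cons a t ih =>
    cases t with
    | nil => intro _ _; simp [NA]
    | cons b r =>
      intro i h
      simp only [pvFirstPair] at h
      split at h
      · simp at h
      · rename_i hne
        have := ih (i + 1) h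
        exact List.isChain_cons.mpr ⟨by simpa using hne, this⟩

theorem pvFirstPair_some : ∀ (l : List Char) (i j : Nat), pvFirstPair l i = some j →
    ∃ u c v, l = u ++ c :: c :: v ∧ i + u.length = j := by
  intro l
  induction l with
  | nil => intro i j h; simp [pvFirstPair] at h
  | cons a t ih =>
    cases t with
    | nil => intro i j h; simp [pvFirstPair] at h
    | cons b r =>
      intro i j h
      simp only [pvFirstPair] at h
      split at h
      · rename_i he
        cases h
        subst he
        exact ⟨[], a, r, by simp⟩
      · rcases ih (i + 1) j h with ⟨u, c, v, hl, hlen⟩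
        exact ⟨a :: u, c, v, by simp [hl], by simp; omega⟩

theorem reduce_eq_stack : ∀ (n : Nat) (l : List Char), l.length ≤ n →
    pvReduceLoop l = ((l.foldl pvStepA []).length == 0) := by
  intro n
  induction n with
  | zero =>
    intro l hl
    have : l = [] := List.length_eq_zero_iff.mp (Nat.le_zero.mp hl)
    subst this
    rw [pvReduceLoop]
    rfl
  | succ n ih =>
    intro l hl
    rw [pvReduceLoop]
    split
    · rename_i h
      have hna := pvFirstPair_none l 0 h
      rw [foldl_nopair l [] (by simpa using hna)]
      simp
    · rename_i j h
      rcases pvFirstPair_some l 0 j h with ⟨u, c, v, hlu, hlen⟩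
      simp only [Nat.zero_add] at hlen
      subst hlen
      have htake : l.take u.length = u := by rw [hlu]; simp
      have hdrop : l.drop (u.length + 2) = v := by
        have h2 : l = (u ++ [c, c]) ++ v := by simp [hlu]
        rw [h2, show u.length + 2 = (u ++ [c, c]).length by simp]
        exact List.drop_left
      rw [htake, hdrop]
      have hlen2 : (u ++ v).length ≤ n := by
        have := hl
        rw [hlu] at this
        simp at this ⊢
        omega
      rw [ih (u ++ v) hlen2]
      rw [hlu, foldl_cancel (by simp [NA]) u v c]

-- ===== VERDICT (by name: the statement is the Claim_ definition above) =====
theorem validString_spec : Claim_equal_validString := by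
  intro s _
  unfold Spec_validString validString validString_alt
  rw [reduce_eq_stack s.toList.length s.toList le_rfl]
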